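-- pv_equiv track=rewrite | github.com/poi1nt/Regular | main.py | union_date
-- ===== SOURCE A (Python) =====
-- def union_date(phonebook):
--     dict_phonebook = {}
--     for i in phonebook:
--         if i[0] not in dict_phonebook:
--             dict_phonebook[i[0]] = list(i[1:])
--         else:
--             list_info = []
--             for j in range(len(dict_phonebook.get(i[0]))):
--                 info = dict_phonebook.get(i[0])[j]
--                 if info == "":
--                     list_info.append(i[j+1])
--                 else:
--                     list_info.append(info)
--             dict_phonebook[i[0]] = list_info
--     phonebook = [[k, v] for k, v in dict_phonebook.items()]
--     list_phonebook = [['lastname', 'firstname', 'surname', 'organization', 'position', 'phone', 'email']]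
--     for i in phonebook:
--         list_1 = []
--         list_1.append(i[0])
--         for j in (i[1]):
--             list_1.append(j)
--         list_phonebook.append(list_1)
--     return(list_phonebook)
-- ===== SOURCE B (Python) =====
-- def union_date(phonebook):
--     groups = {}
--     for rec in phonebook:
--         groups.setdefault(rec[0], []).append(rec)
--     result = [['lastname', 'firstname', 'surname', 'organization', 'position', 'phone', 'email']]
--     for lastname, recs in groups.items():
--         first = recs[0]
--         row = [lastname]
--         for j in range(len(first) - 1):
--             value = first[j + 1]
--             for rec in recs[1:]:
--                 if value != "":
--                     break
--                 value = rec[j + 1]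
--             row.append(value)
--         result.append(row)
--     return result
-- ===== Notes on version B (the rewrite author's own statement) =====
-- stated objective: simpler
-- what changed: B first groups the full records by lastname with dict.setdefault in one pass and then merges each group field-by-field in a single scan (stopping at the first non-empty value), instead of A's re-merging and overwriting the partial field list in the dict on every duplicate record.
import Mathlib
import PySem

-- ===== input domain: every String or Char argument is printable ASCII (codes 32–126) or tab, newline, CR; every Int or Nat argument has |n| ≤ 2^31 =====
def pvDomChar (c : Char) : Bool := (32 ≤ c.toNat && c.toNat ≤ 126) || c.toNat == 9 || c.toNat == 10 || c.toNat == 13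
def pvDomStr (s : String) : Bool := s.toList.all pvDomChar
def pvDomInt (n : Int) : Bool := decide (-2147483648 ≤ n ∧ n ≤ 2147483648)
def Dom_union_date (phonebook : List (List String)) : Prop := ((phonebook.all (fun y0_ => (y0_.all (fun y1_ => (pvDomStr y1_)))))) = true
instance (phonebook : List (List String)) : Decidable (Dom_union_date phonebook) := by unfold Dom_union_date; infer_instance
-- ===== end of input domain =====

-- B re-groups the records by lastname with dict.setdefault and merges each group in one
-- field-wise pass, instead of A's incremental merge-and-overwrite of the partial field list
-- on every duplicate record (objective: simpler decomposition, same return value).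

-- ===== PORT A =====
-- Transliteration of A. Python's i[0], dict.get(i[0])[j] and i[j+1] are ported with
-- PySem.List.pyGetD _ _ <default>: Pre_union_date guarantees every such access is in range
-- (outside Pre_ the Python raises IndexError, see Pre_union_date).
-- A's dict loop body (`for i in phonebook: ...`).
def stepA (d : PySem.Dict String (List String)) (i : List String) : PySem.Dict String (List String) :=
  let key := PySem.List.pyGetD i 0 ""
  if d.contains key = false then
    d.insert key (PySem.List.slice i (some 1) none)
  else
    let listInfo := (PySem.List.pyRange 0 ((d.getD key []).length : Int)).foldl
      (fun acc j =>
        let info := PySem.List.pyGetD (d.getD key []) j ""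
        if info = "" then acc ++ [PySem.List.pyGetD i (j + 1) ""] else acc ++ [info]) []
    d.insert key listInfo

-- A's output loop: header row, then [k] ++ v for each dict item (k, v).
def outA (d : PySem.Dict String (List String)) : List (List String) :=
  d.items.foldl (fun acc kv =>
      let l1 := kv.2.foldl (fun l j => l ++ [j]) [kv.1]
      acc ++ [l1])
    [["lastname", "firstname", "surname", "organization", "position", "phone", "email"]]

def union_date (phonebook : List (List String)) : List (List String) :=
  outA (phonebook.foldl stepA PySem.Dict.empty)

-- ===== PORT B =====
-- Transliteration of Source B. groups.setdefault(rec[0], []).append(rec) is Dict.modify with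
-- default []; the inner 'break' loop is the fold that keeps v once it is non-empty.
def stepB (g : PySem.Dict String (List (List String))) (rec : List String) :
    PySem.Dict String (List (List String)) :=
  g.modify (PySem.List.pyGetD rec 0 "") [] (fun l => l ++ [rec])

-- Source B's output loop: header row, then [lastname] ++ merged fields for each group.
def outB (g : PySem.Dict String (List (List String))) : List (List String) :=
  g.items.foldl (fun res kv =>
      let first := PySem.List.pyGetD kv.2 0 []
      let row := (PySem.List.pyRange 0 ((first.length : Int) - 1)).foldl (fun row j =>
          row ++ [(PySem.List.slice kv.2 (some 1) none).foldl
                    (fun v rec => if v ≠ "" then v else PySem.List.pyGetD rec (j + 1) "")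
                    (PySem.List.pyGetD first (j + 1) "")])
        [kv.1]
      res ++ [row])
    [["lastname", "firstname", "surname", "organization", "position", "phone", "email"]]

def union_date_alt (phonebook : List (List String)) : List (List String) :=
  outB (phonebook.foldl stepB PySem.Dict.empty)

-- ===== PRECONDITION & SPEC =====
-- Pre_ excludes exactly the inputs on which Python A raises IndexError: a phonebook with an
-- empty record, or one where some duplicate record i is reached with a field index j at
-- which every earlier same-lastname record is empty or too short (so the merged value is
-- still "") while i itself has no field j+1 — the lazy access i[j+1] then raises.
-- (B raises there too; on every input admitted by Pre_ both Pythons return.)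
def Pre_union_date (phonebook : List (List String)) : Prop :=
  (∀ r ∈ phonebook, r ≠ []) ∧
  ∀ p < phonebook.length, ∀ f < p,
    ((phonebook.getD f []).headD "" = (phonebook.getD p []).headD "" ∧
      ∀ q < f, (phonebook.getD q []).headD "" ≠ (phonebook.getD p []).headD "") →
    ∀ j < (phonebook.getD f []).length - 1,
      (∃ q < p, (phonebook.getD q []).headD "" = (phonebook.getD p []).headD "" ∧
        j + 1 < (phonebook.getD q []).length ∧ (phonebook.getD q []).getD (j + 1) "" ≠ "") ∨
      j + 1 < (phonebook.getD p []).length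
instance (phonebook : List (List String)) : Decidable (Pre_union_date phonebook) := by
  unfold Pre_union_date
  exact instDecidableAnd
    (dq := @Nat.decidableBallLT _ _ (fun p hp => @Nat.decidableBallLT _ _ (fun f hf => inferInstance)))

def pvWitness_union_date : List (List String) := [["a", "b"], ["a", ""], ["c"]]

def Spec_union_date (phonebook : List (List String)) (out : List (List String)) : Prop := out = union_date_alt phonebook
instance (phonebook : List (List String)) (out : List (List String)) : Decidable (Spec_union_date phonebook out) := by unfold Spec_union_date; infer_instance

-- ===== CLAIM (what is proved, stated in full; the proofs are below) =====
def Claim_equal_union_date : Prop := ∀ (phonebook : List (List String)), Dom_union_date phonebook → Pre_union_date phonebook → Spec_union_date phonebook (union_date phonebook)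

-- ===== LEMMAS AND PROOFS =====
-- (The two ports in fact agree on every input — the proof below never uses Pre_;
-- Pre_ is there because the PYTHONS raise outside it, while the ports are totalized.)

-- The value B's inner field loop produces for group rs at field index j.
def mVal (rs : List (List String)) (j : Int) : String :=
  (PySem.List.slice rs (some 1) none).foldl
    (fun v rec => if v ≠ "" then v else PySem.List.pyGetD rec (j + 1) "")
    (PySem.List.pyGetD (PySem.List.pyGetD rs 0 []) (j + 1) "")

-- The merged field list B produces for group rs (without the key).
def mRow (rs : List (List String)) : List String :=
  (PySem.List.pyRange 0 (((PySem.List.pyGetD rs 0 []).length : Int) - 1)).map (mVal rs)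

-- A's dict entry corresponding to B's group entry.
def mEntry (kv : String × List (List String)) : String × List String := (kv.1, mRow kv.2)

lemma mRow_singleton (i : List String) :
    mRow [i] = PySem.List.slice i (some 1) none := by
  rw [PySem.List.slice_from _ (by norm_num)]
  cases i with
  | nil => decide
  | cons a t =>
    unfold mRow mVal
    rw [PySem.List.slice_from _ (by norm_num)]
    simp only [PySem.List.pyGetD_ofNat', List.getD, List.length_cons, Int.toNat_one,
      List.drop_succ_cons, List.drop_zero, List.getElem?_cons_zero, Option.getD_some,
      List.foldl_nil]
    rw [show ((t.length + 1 : Nat) : Int) - 1 = ((t.length : Nat) : Int) by push_cast; ring]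
    rw [PySem.List.pyRange_zero_natCast]
    rw [List.map_map]
    apply List.ext_getElem (by simp)
    intro n h1 h2
    simp only [List.getElem_map, List.getElem_range, Function.comp_apply]
    rw [show ((n : Int) + 1) = ((n + 1 : Nat) : Int) by push_cast; ring]
    rw [PySem.List.pyGetD_natCast]
    simp at h2
    simp [List.getD, List.getElem?_cons_succ, List.getElem?_eq_getElem h2]

lemma mRow_append (rs : List (List String)) (i : List String) (h : rs ≠ []) :
    mRow (rs ++ [i]) =
      (PySem.List.pyRange 0 ((mRow rs).length : Int)).map
        (fun j => if PySem.List.pyGetD (mRow rs) j "" = ""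
                  then PySem.List.pyGetD i (j + 1) "" else PySem.List.pyGetD (mRow rs) j "") := by
  cases rs with
  | nil => exact absurd rfl h
  | cons a t =>
    have hfirst : PySem.List.pyGetD ((a :: t) ++ [i]) 0 [] = a := by
      simp [PySem.List.pyGetD_ofNat', List.getD]
    have hfirst' : PySem.List.pyGetD (a :: t) 0 [] = a := by
      simp [PySem.List.pyGetD_ofNat', List.getD]
    have hsl : PySem.List.slice ((a :: t) ++ [i]) (some 1) none = t ++ [i] := by
      rw [PySem.List.slice_from _ (by norm_num)]; simp
    have hsl' : PySem.List.slice (a :: t) (some 1) none = t := by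
      rw [PySem.List.slice_from _ (by norm_num)]; simp
    have hval : ∀ j : Int, mVal ((a :: t) ++ [i]) j =
        if mVal (a :: t) j ≠ "" then mVal (a :: t) j else PySem.List.pyGetD i (j + 1) "" := by
      intro j
      unfold mVal
      rw [hsl, hsl', hfirst, hfirst', List.foldl_append, List.foldl_cons, List.foldl_nil]
    by_cases hA : a = []
    · subst hA
      unfold mRow
      rw [hfirst, hfirst']
      norm_num
    · have hapos : 0 < a.length := List.length_pos_iff.mpr hA
      have hlen : ((a.length : Int)) - 1 = ((a.length - 1 : Nat) : Int) := by
        omega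
      unfold mRow
      rw [hfirst, hfirst', hlen]
      have hbound : ((List.map (mVal (a :: t)) (PySem.List.pyRange 0 ((a.length - 1 : Nat) : Int))).length : Int) = ((a.length - 1 : Nat) : Int) := by
        simp [PySem.List.pyRange_zero_natCast]
      rw [hbound, PySem.List.pyRange_zero_natCast, List.map_map, List.map_map]
      apply List.ext_getElem (by simp)
      intro n h1 h2
      simp only [List.getElem_map, List.getElem_range, Function.comp_apply]
      have hn : n < a.length - 1 := by simpa using h1
      have hget : PySem.List.pyGetD (List.map (mVal (a :: t)) (List.map (fun k : Nat => (k : Int)) (List.range (a.length - 1)))) ((n : Nat) : Int) "" = mVal (a :: t) ((n : Nat) : Int) := by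
        rw [PySem.List.pyGetD_natCast]
        rw [List.getD_eq_getElem _ _ (by simpa using hn)]
        simp
      rw [hval, hget]
      by_cases hv : mVal (a :: t) ((n : Nat) : Int) = ""
      · simp [hv]
      · simp [hv]

lemma contains_map (g : PySem.Dict String (List (List String))) (k : String) :
    (PySem.Dict.mk (g.items.map mEntry)).contains k = g.contains k := by
  simp [PySem.Dict.contains, List.any_map, mEntry, Function.comp_def]

lemma get?_map (l : List (String × List (List String))) (k : String) :
    (PySem.Dict.mk (l.map mEntry)).get? k = ((PySem.Dict.mk l).get? k).map mRow := by
  induction l with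
  | nil => simp [PySem.Dict.get?]
  | cons p rest ih =>
    simp only [List.map_cons, mEntry]
    rw [PySem.Dict.get?_mk_cons, PySem.Dict.get?_mk_cons]
    by_cases hk : (p.1 == k)
    · simp [hk]
    · simp [hk, ih]

lemma insert_map (g : PySem.Dict String (List (List String))) (k : String) (v : List (List String)) :
    (PySem.Dict.mk (g.items.map mEntry)).insert k (mRow v)
      = PySem.Dict.mk ((g.insert k v).items.map mEntry) := by
  apply PySem.Dict.ext
  rw [PySem.Dict.items_insert, PySem.Dict.items_insert, contains_map]
  by_cases hc : g.contains k
  · simp only [hc, if_true, List.map_map]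
    apply List.map_congr_left
    intro p hp
    by_cases hpk : p.1 = k <;> simp [mEntry, hpk]
  · simp [hc, mEntry]

lemma step_eq (g : PySem.Dict String (List (List String))) (i : List String)
    (hg : ∀ kv ∈ g.items, kv.2 ≠ []) :
    stepA ⟨g.items.map mEntry⟩ i = ⟨(stepB g i).items.map mEntry⟩ := by
  unfold stepA stepB
  dsimp only
  rw [contains_map]
  by_cases hc : g.contains (PySem.List.pyGetD i 0 "")
  · -- existing group
    obtain ⟨rs, hrs⟩ : ∃ rs, g.get? (PySem.List.pyGetD i 0 "") = some rs := by
      have := PySem.Dict.contains_eq_isSome_get? (d := g) (k := PySem.List.pyGetD i 0 "")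
      rw [hc] at this
      exact Option.isSome_iff_exists.mp this.symm
    have hrsne : rs ≠ [] :=
      hg _ (PySem.Dict.mem_items_of_get?_eq_some g hrs)
    have hgetA : (PySem.Dict.mk (g.items.map mEntry)).getD (PySem.List.pyGetD i 0 "") [] = mRow rs := by
      rw [PySem.Dict.getD_eq_get?_getD, get?_map, hrs]; rfl
    have hgetB : g.getD (PySem.List.pyGetD i 0 "") [] = rs := by
      rw [PySem.Dict.getD_eq_get?_getD, hrs]; rfl
    simp only [hc, Bool.true_eq_false, if_false, PySem.Dict.modify, hgetA, hgetB]
    have hbody : (fun (acc : List String) (j : Int) =>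
        if PySem.List.pyGetD (mRow rs) j "" = "" then acc ++ [PySem.List.pyGetD i (j + 1) ""]
        else acc ++ [PySem.List.pyGetD (mRow rs) j ""])
        = fun (acc : List String) (j : Int) => acc ++ [if PySem.List.pyGetD (mRow rs) j "" = ""
            then PySem.List.pyGetD i (j + 1) "" else PySem.List.pyGetD (mRow rs) j ""] := by
      funext acc j; split <;> rfl
    rw [hbody, PySem.List.foldl_append_singleton_eq_map, List.nil_append, ← mRow_append rs i hrsne]
    exact insert_map g _ (rs ++ [i])
  · -- new key
    simp only [Bool.not_eq_true] at hc
    simp only [hc, if_pos, PySem.Dict.modify,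
      PySem.Dict.getD_of_not_contains g [] hc, List.nil_append]
    rw [← mRow_singleton]
    exact insert_map g _ [i]

lemma fold_eq (t : List (List String)) (g : PySem.Dict String (List (List String)))
    (hg : ∀ kv ∈ g.items, kv.2 ≠ []) :
    t.foldl stepA ⟨g.items.map mEntry⟩ = ⟨(t.foldl stepB g).items.map mEntry⟩ := by
  induction t generalizing g with
  | nil => simp
  | cons i t ih =>
    rw [List.foldl_cons, List.foldl_cons, step_eq g i hg]
    apply ih
    intro kv hkv
    unfold stepB PySem.Dict.modify at hkv
    rcases (PySem.Dict.mem_items_insert _ _ _ _).mp hkv with h | h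
    · rw [h]; simp
    · exact hg kv h.1

lemma out_eq (g : PySem.Dict String (List (List String))) :
    outA ⟨g.items.map mEntry⟩ = outB g := by
  unfold outA outB
  have hA : (fun (acc : List (List String)) (kv : String × List String) =>
      let l1 := kv.2.foldl (fun l j => l ++ [j]) [kv.1]
      acc ++ [l1]) = fun acc kv => acc ++ [[kv.1] ++ kv.2] := by
    funext acc kv
    dsimp only
    rw [PySem.List.foldl_append_singleton_eq_self]
  have hB : (fun (res : List (List String)) (kv : String × List (List String)) =>
      let first := PySem.List.pyGetD kv.2 0 []
      let row := (PySem.List.pyRange 0 ((first.length : Int) - 1)).foldl (fun row j =>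
          row ++ [(PySem.List.slice kv.2 (some 1) none).foldl
                    (fun v rec => if v ≠ "" then v else PySem.List.pyGetD rec (j + 1) "")
                    (PySem.List.pyGetD first (j + 1) "")])
        [kv.1]
      res ++ [row]) = fun res kv => res ++ [[kv.1] ++ mRow kv.2] := by
    funext res kv
    show res ++ [(PySem.List.pyRange 0 (((PySem.List.pyGetD kv.2 0 []).length : Int) - 1)).foldl
        (fun row j => row ++ [mVal kv.2 j]) [kv.1]] = _
    rw [PySem.List.foldl_append_singleton_eq_map]
    rfl
  rw [hA, hB, PySem.List.foldl_append_singleton_eq_map, PySem.List.foldl_append_singleton_eq_map]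
  simp [List.map_map, mEntry, Function.comp_def]

lemma ports_eq (phonebook : List (List String)) :
    union_date phonebook = union_date_alt phonebook := by
  unfold union_date union_date_alt
  have h : phonebook.foldl stepA PySem.Dict.empty
      = ⟨(phonebook.foldl stepB PySem.Dict.empty).items.map mEntry⟩ :=
    fold_eq phonebook PySem.Dict.empty (by intro kv hkv; simp [PySem.Dict.empty] at hkv)
  rw [h]
  exact out_eq _

-- ===== VERDICT (by name: the statement is the Claim_ definition above) =====
theorem union_date_spec : Claim_equal_union_date := by
  intro pb _ _
  unfold Spec_union_date
  exact ports_eq pb
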